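-- pv_equiv track=rewrite | github.com/calico/shorkie-paper | analysis/shorkie_lm/motif_analysis/motif_lm/7_motif_enrichment/1_motif_ovp_bed.py | compute_bin_level_metrics
-- ===== SOURCE A (Python) =====
-- def intervals_overlap(start1, end1, start2, end2):
--     """
--     Returns True if the intervals (start1, end1) and (start2, end2) overlap.
--     """
--     return start1 < end2 and start2 < end1
--
-- def is_bin_covered(bin_start, bin_end, intervals):
--     """
--     Return True if the bin [bin_start, bin_end) overlaps any interval in intervals.
--     """
--     for s, e in intervals:
--         if intervals_overlap(s, e, bin_start, bin_end):
--             return True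
--     return False
--
-- def compute_bin_level_metrics(pred_dict, gt_dict, bin_size=10):
--     """
--     Compute bin-level TP, FP, TN, FN over the union of predicted and ground truth intervals
--     for each chromosome (using the provided bin_size), then return overall metrics.
--     """
--     total_TP = total_FP = total_TN = total_FN = 0
--     for chrom in set(list(pred_dict.keys()) + list(gt_dict.keys())):
--         pred_intervals = pred_dict.get(chrom, [])
--         gt_intervals = gt_dict.get(chrom, [])
--         if not pred_intervals and not gt_intervals:
--             continue
--         all_intervals = pred_intervals + gt_intervals
--         region_start = min(s for s, e in all_intervals)
--         region_end = max(e for s, e in all_intervals)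
--         for b in range(region_start, region_end, bin_size):
--             bin_start = b
--             bin_end = min(b + bin_size, region_end)
--             pred_label = 1 if is_bin_covered(bin_start, bin_end, pred_intervals) else 0
--             gt_label = 1 if is_bin_covered(bin_start, bin_end, gt_intervals) else 0
--             if pred_label == 1 and gt_label == 1:
--                 total_TP += 1
--             elif pred_label == 1 and gt_label == 0:
--                 total_FP += 1
--             elif pred_label == 0 and gt_label == 1:
--                 total_FN += 1
--             else:
--                 total_TN += 1
--     return total_TP, total_FP, total_TN, total_FN
-- ===== SOURCE B (Python) =====
-- def covered_bins(intervals, region_start, region_end, bin_size, nbins):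
--     """
--     Set of bin indices k (0 <= k < nbins) whose bin [region_start + k*bin_size,
--     min(region_start + (k+1)*bin_size, region_end)) overlaps some interval:
--     each interval contributes one contiguous index range, computed by floor division.
--     """
--     covered = set()
--     for s, e in intervals:
--         if s < region_end:
--             k1 = max(0, (s - region_start) // bin_size)
--             k2 = min(nbins, -((region_start - e) // bin_size))
--             covered.update(range(k1, k2))
--     return covered
--
-- def compute_bin_level_metrics(pred_dict, gt_dict, bin_size=10):
--     total_TP = total_FP = total_TN = total_FN = 0
--     for chrom in set(list(pred_dict.keys()) + list(gt_dict.keys())):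
--         pred_intervals = pred_dict.get(chrom, [])
--         gt_intervals = gt_dict.get(chrom, [])
--         if not pred_intervals and not gt_intervals:
--             continue
--         all_intervals = pred_intervals + gt_intervals
--         region_start = min(s for s, e in all_intervals)
--         region_end = max(e for s, e in all_intervals)
--         nbins = max(0, -((region_start - region_end) // bin_size))  # ceil((end-start)/bin_size)
--         p = covered_bins(pred_intervals, region_start, region_end, bin_size, nbins)
--         g = covered_bins(gt_intervals, region_start, region_end, bin_size, nbins)
--         tp = len(p & g)
--         fp = len(p - g)
--         fn = len(g - p)
--         total_TP += tp
--         total_FP += fp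
--         total_FN += fn
--         total_TN += nbins - tp - fp - fn
--     return total_TP, total_FP, total_TN, total_FN
-- ===== Notes on version B (the rewrite author's own statement) =====
-- stated objective: alternative
-- what changed: Instead of testing every bin against every interval (bins x intervals work per chromosome), B converts each interval once by floor division into its contiguous range of covered bin indices, collects those indices into per-source sets, and derives TP/FP/FN as sizes of set intersection/differences and TN analytically as nbins minus the rest.
-- outside the precondition, e.g. on compute_bin_level_metrics({'a': []}, {}, 0): A returns (0, 0, 0, 0), B returns (0, 0, 0, 0); on compute_bin_level_metrics({'a': [(0, 5)]}, {}, 0): A raises ValueError, B raises ZeroDivisionError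
import Mathlib
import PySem

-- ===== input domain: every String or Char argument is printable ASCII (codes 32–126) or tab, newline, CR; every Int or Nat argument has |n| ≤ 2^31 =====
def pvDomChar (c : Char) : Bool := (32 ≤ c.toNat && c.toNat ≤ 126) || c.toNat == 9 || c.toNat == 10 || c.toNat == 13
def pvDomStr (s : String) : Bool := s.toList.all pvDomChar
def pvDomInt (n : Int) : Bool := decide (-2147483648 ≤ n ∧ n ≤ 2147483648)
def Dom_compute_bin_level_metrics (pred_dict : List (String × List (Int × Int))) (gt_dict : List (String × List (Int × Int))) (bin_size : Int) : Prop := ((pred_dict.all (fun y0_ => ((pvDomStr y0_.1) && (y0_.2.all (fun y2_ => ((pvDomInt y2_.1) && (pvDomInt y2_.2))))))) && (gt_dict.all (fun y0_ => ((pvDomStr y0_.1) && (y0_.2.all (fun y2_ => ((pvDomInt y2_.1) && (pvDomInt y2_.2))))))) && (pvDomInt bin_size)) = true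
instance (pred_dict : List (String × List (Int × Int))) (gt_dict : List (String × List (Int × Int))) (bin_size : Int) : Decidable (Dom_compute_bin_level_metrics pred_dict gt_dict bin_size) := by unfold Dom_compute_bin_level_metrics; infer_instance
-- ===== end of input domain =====

-- B replaces A's per-bin scan of every interval by per-interval bin-index ranges
-- (floor-division arithmetic) collected into sets, with set algebra giving the four
-- counts; objective: alternative (a genuinely different traversal of the same data).

-- ===== PORT A =====
def pv_intervals_overlap (start1 end1 start2 end2 : Int) : Bool :=
  decide (start1 < end2) && decide (start2 < end1)

def pv_is_bin_covered (bin_start bin_end : Int) (intervals : List (Int × Int)) : Bool :=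
  intervals.any (fun p => pv_intervals_overlap p.1 p.2 bin_start bin_end)

def pv_bin_step (bin_size region_end : Int) (pred_intervals gt_intervals : List (Int × Int))
    (acc : Int × Int × Int × Int) (b : Int) : Int × Int × Int × Int :=
  let bin_end := min (b + bin_size) region_end
  let pred_label : Int := if pv_is_bin_covered b bin_end pred_intervals then 1 else 0
  let gt_label : Int := if pv_is_bin_covered b bin_end gt_intervals then 1 else 0
  if pred_label = 1 ∧ gt_label = 1 then (acc.1 + 1, acc.2.1, acc.2.2.1, acc.2.2.2)
  else if pred_label = 1 ∧ gt_label = 0 then (acc.1, acc.2.1 + 1, acc.2.2.1, acc.2.2.2)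
  else if pred_label = 0 ∧ gt_label = 1 then (acc.1, acc.2.1, acc.2.2.1, acc.2.2.2 + 1)
  else (acc.1, acc.2.1, acc.2.2.1 + 1, acc.2.2.2)

def compute_bin_level_metrics (pred_dict : List (String × List (Int × Int))) (gt_dict : List (String × List (Int × Int))) (bin_size : Int) : Int × Int × Int × Int :=
  let predD := PySem.Dict.ofList pred_dict
  let gtD := PySem.Dict.ofList gt_dict
  (PySem.Set.ofList (predD.keys ++ gtD.keys)).foldl (fun acc chrom =>
    let pred_intervals := predD.getD chrom []
    let gt_intervals := gtD.getD chrom []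
    if pred_intervals = [] ∧ gt_intervals = [] then acc
    else
      let all_intervals := pred_intervals ++ gt_intervals
      let region_start := (PySem.List.min? (all_intervals.map (·.1)) id).getD 0
      let region_end := (PySem.List.max? (all_intervals.map (·.2)) id).getD 0
      (PySem.List.pyRange region_start region_end bin_size).foldl
        (pv_bin_step bin_size region_end pred_intervals gt_intervals) acc)
    (0, 0, 0, 0)

-- ===== PORT B =====
def covered_bins (intervals : List (Int × Int)) (region_start region_end bin_size nbins : Int) : PySem.Set Int :=
  intervals.foldl (fun covered p =>
    if p.1 < region_end then
      PySem.Set.update covered (PySem.List.pyRange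
        (max 0 (PySem.Int.floordiv (p.1 - region_start) bin_size))
        (min nbins (-(PySem.Int.floordiv (region_start - p.2) bin_size))) 1)
    else covered) PySem.Set.empty

def compute_bin_level_metrics_alt (pred_dict : List (String × List (Int × Int))) (gt_dict : List (String × List (Int × Int))) (bin_size : Int) : Int × Int × Int × Int :=
  let predD := PySem.Dict.ofList pred_dict
  let gtD := PySem.Dict.ofList gt_dict
  (PySem.Set.ofList (predD.keys ++ gtD.keys)).foldl (fun acc chrom =>
    let pred_intervals := predD.getD chrom []
    let gt_intervals := gtD.getD chrom []
    if pred_intervals = [] ∧ gt_intervals = [] then acc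
    else
      let all_intervals := pred_intervals ++ gt_intervals
      let region_start := (PySem.List.min? (all_intervals.map (·.1)) id).getD 0
      let region_end := (PySem.List.max? (all_intervals.map (·.2)) id).getD 0
      let nbins := max 0 (-(PySem.Int.floordiv (region_start - region_end) bin_size))
      let p := covered_bins pred_intervals region_start region_end bin_size nbins
      let g := covered_bins gt_intervals region_start region_end bin_size nbins
      let tp := PySem.Set.len (PySem.Set.inter p g)
      let fp := PySem.Set.len (PySem.Set.diff p g)
      let fn := PySem.Set.len (PySem.Set.diff g p)
      (acc.1 + tp, acc.2.1 + fp, acc.2.2.1 + (nbins - tp - fp - fn), acc.2.2.2 + fn))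
    (0, 0, 0, 0)

-- ===== PRECONDITION & SPEC =====
-- Pre_ excludes bin_size = 0, on which A raises ValueError (range() with step 0)
-- whenever some chromosome has intervals; only when every interval list is empty do
-- both programs still return (all-zero counts) there.
def Pre_compute_bin_level_metrics (pred_dict : List (String × List (Int × Int))) (gt_dict : List (String × List (Int × Int))) (bin_size : Int) : Prop := bin_size ≠ 0
instance (pred_dict : List (String × List (Int × Int))) (gt_dict : List (String × List (Int × Int))) (bin_size : Int) : Decidable (Pre_compute_bin_level_metrics pred_dict gt_dict bin_size) := by unfold Pre_compute_bin_level_metrics; infer_instance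

def pvWitness_compute_bin_level_metrics : (List (String × List (Int × Int))) × (List (String × List (Int × Int))) × Int :=
  ([("chr1", [(0, 5), (12, 18)])], [("chr1", [(3, 20)]), ("chr2", [(-4, 2)])], 10)

def Spec_compute_bin_level_metrics (pred_dict : List (String × List (Int × Int))) (gt_dict : List (String × List (Int × Int))) (bin_size : Int) (out : Int × Int × Int × Int) : Prop := out = compute_bin_level_metrics_alt pred_dict gt_dict bin_size
instance (pred_dict : List (String × List (Int × Int))) (gt_dict : List (String × List (Int × Int))) (bin_size : Int) (out : Int × Int × Int × Int) : Decidable (Spec_compute_bin_level_metrics pred_dict gt_dict bin_size out) := by unfold Spec_compute_bin_level_metrics; infer_instance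

-- ===== CLAIM (what is proved, stated in full; the proofs are below) =====
def Claim_equal_compute_bin_level_metrics : Prop := ∀ (pred_dict : List (String × List (Int × Int))) (gt_dict : List (String × List (Int × Int))) (bin_size : Int), Dom_compute_bin_level_metrics pred_dict gt_dict bin_size → Pre_compute_bin_level_metrics pred_dict gt_dict bin_size → Spec_compute_bin_level_metrics pred_dict gt_dict bin_size (compute_bin_level_metrics pred_dict gt_dict bin_size)

-- ===== LEMMAS AND PROOFS =====

-- A's classification loop body, with the two coverage tests abstracted as Booleans.
lemma pv_bin_step_eq_classify (bin_size region_end : Int) (pi gi : List (Int × Int))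
    (acc : Int × Int × Int × Int) (b : Int) :
    pv_bin_step bin_size region_end pi gi acc b =
      (if pv_is_bin_covered b (min (b + bin_size) region_end) pi &&
          pv_is_bin_covered b (min (b + bin_size) region_end) gi then
        (acc.1 + 1, acc.2.1, acc.2.2.1, acc.2.2.2)
      else if pv_is_bin_covered b (min (b + bin_size) region_end) pi &&
          !pv_is_bin_covered b (min (b + bin_size) region_end) gi then
        (acc.1, acc.2.1 + 1, acc.2.2.1, acc.2.2.2)
      else if !pv_is_bin_covered b (min (b + bin_size) region_end) pi &&
          pv_is_bin_covered b (min (b + bin_size) region_end) gi then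
        (acc.1, acc.2.1, acc.2.2.1, acc.2.2.2 + 1)
      else (acc.1, acc.2.1, acc.2.2.1 + 1, acc.2.2.2)) := by
  cases hp : pv_is_bin_covered b (min (b + bin_size) region_end) pi <;>
    cases hg : pv_is_bin_covered b (min (b + bin_size) region_end) gi <;>
      simp [pv_bin_step, hp, hg]

-- Folding a classify-into-four-counters loop counts the four predicate combinations.
lemma foldl_classify {α : Type} (pA gA : α → Bool) (L : List α) (acc : Int × Int × Int × Int) :
    L.foldl (fun acc b =>
      if pA b && gA b then (acc.1 + 1, acc.2.1, acc.2.2.1, acc.2.2.2)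
      else if pA b && !gA b then (acc.1, acc.2.1 + 1, acc.2.2.1, acc.2.2.2)
      else if !pA b && gA b then (acc.1, acc.2.1, acc.2.2.1, acc.2.2.2 + 1)
      else (acc.1, acc.2.1, acc.2.2.1 + 1, acc.2.2.2)) acc
      = (acc.1 + (L.countP fun b => pA b && gA b),
         acc.2.1 + (L.countP fun b => pA b && !gA b),
         acc.2.2.1 + (L.countP fun b => !pA b && !gA b),
         acc.2.2.2 + (L.countP fun b => !pA b && gA b)) := by
  induction L generalizing acc with
  | nil => simp
  | cons x xs ih =>
    rw [List.foldl_cons, ih]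
    simp only [List.countP_cons]
    cases hp : pA x <;> cases hg : gA x <;>
      simp [hp, hg, Prod.ext_iff] <;> push_cast <;> omega

-- Membership in B's covered-bin set.
lemma mem_covered_bins_aux (ivs : List (Int × Int)) (rs re bs nbins : Int)
    (s0 : PySem.Set Int) (x : Int) :
    x ∈ ivs.foldl (fun covered p =>
        if p.1 < re then
          PySem.Set.update covered (PySem.List.pyRange
            (max 0 (PySem.Int.floordiv (p.1 - rs) bs))
            (min nbins (-(PySem.Int.floordiv (rs - p.2) bs))) 1)
        else covered) s0 ↔
      x ∈ s0 ∨ ∃ p ∈ ivs, p.1 < re ∧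
        max 0 (PySem.Int.floordiv (p.1 - rs) bs) ≤ x ∧
        x < min nbins (-(PySem.Int.floordiv (rs - p.2) bs)) := by
  induction ivs generalizing s0 with
  | nil => simp
  | cons q qs ih =>
    simp only [List.foldl_cons]
    by_cases hq : q.1 < re
    · rw [if_pos hq, ih]
      simp only [PySem.Set.mem_update, PySem.List.mem_pyRange_one, List.mem_cons]
      constructor
      · rintro (((h | h) | ⟨p, hp, h⟩))
        · exact Or.inl h
        · exact Or.inr ⟨q, Or.inl rfl, hq, h⟩
        · exact Or.inr ⟨p, Or.inr hp, h⟩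
      · rintro (h | ⟨p, (rfl | hp), h⟩)
        · exact Or.inl (Or.inl h)
        · exact Or.inl (Or.inr ⟨h.2.1, h.2.2⟩)
        · exact Or.inr ⟨p, hp, h⟩
    · rw [if_neg hq, ih]
      constructor
      · rintro (h | ⟨p, hp, h⟩)
        · exact Or.inl h
        · exact Or.inr ⟨p, List.mem_cons_of_mem _ hp, h⟩
      · rintro (h | ⟨p, hp, h⟩)
        · exact Or.inl h
        · rcases List.mem_cons.mp hp with rfl | hp'
          · exact absurd h.1 hq
          · exact Or.inr ⟨p, hp', h⟩

lemma mem_covered_bins (ivs : List (Int × Int)) (rs re bs nbins x : Int) :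
    x ∈ covered_bins ivs rs re bs nbins ↔
      ∃ p ∈ ivs, p.1 < re ∧
        max 0 (PySem.Int.floordiv (p.1 - rs) bs) ≤ x ∧
        x < min nbins (-(PySem.Int.floordiv (rs - p.2) bs)) := by
  rw [covered_bins, mem_covered_bins_aux]
  simp [PySem.Set.empty]

lemma nodup_covered_bins_aux (ivs : List (Int × Int)) (rs re bs nbins : Int)
    (s0 : PySem.Set Int) (h0 : s0.Nodup) :
    (ivs.foldl (fun covered p =>
        if p.1 < re then
          PySem.Set.update covered (PySem.List.pyRange
            (max 0 (PySem.Int.floordiv (p.1 - rs) bs))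
            (min nbins (-(PySem.Int.floordiv (rs - p.2) bs))) 1)
        else covered) s0).Nodup := by
  induction ivs generalizing s0 with
  | nil => exact h0
  | cons q qs ih =>
    simp only [List.foldl_cons]
    by_cases hq : q.1 < re
    · rw [if_pos hq]; exact ih _ (PySem.Set.nodup_update _ _ h0)
    · rw [if_neg hq]; exact ih _ h0

lemma nodup_covered_bins (ivs : List (Int × Int)) (rs re bs nbins : Int) :
    (covered_bins ivs rs re bs nbins).Nodup :=
  nodup_covered_bins_aux ivs rs re bs nbins PySem.Set.empty List.nodup_nil

lemma countP_four {α : Type} (L : List α) (pA gA : α → Bool) :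
    L.countP (fun b => pA b && gA b) + L.countP (fun b => pA b && !gA b)
      + L.countP (fun b => !pA b && !gA b) + L.countP (fun b => !pA b && gA b)
      = L.length := by
  induction L with
  | nil => simp
  | cons x xs ih =>
    simp only [List.countP_cons, List.length_cons]
    cases hp : pA x <;> cases hg : gA x <;> simp [hp, hg] <;> omega

-- the number of bins A iterates equals B's nbins
lemma range_len_eq_nbins (rs re bs : Int) (hbs : 0 < bs) :
    (if rs < re then ((re - rs + bs - 1) / bs).toNat else 0)
      = (max 0 (-(PySem.Int.floordiv (rs - re) bs))).toNat := by
  by_cases h : rs < re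
  · rw [if_pos h]
    have h1 : (1:Int) ≤ -(PySem.Int.floordiv (rs - re) bs) := by
      have : PySem.Int.floordiv (rs - re) bs < 0 := by
        rw [PySem.Int.floordiv_lt_iff_lt_mul hbs]; simpa using by linarith
      omega
    have hmax : max 0 (-(PySem.Int.floordiv (rs - re) bs)) = -(PySem.Int.floordiv (rs - re) bs) := by omega
    rw [hmax]
    congr 1
    have hneg : rs - re = -(re - rs) := by ring
    rw [hneg]
    symm
    rw [PySem.Int.neg_floordiv_neg_eq_iff_of_pos hbs]
    have h0 := Int.ediv_add_emod (re - rs + bs - 1) bs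
    have hm0 := Int.emod_nonneg (re - rs + bs - 1) (ne_of_gt hbs)
    have hm1 := Int.emod_lt_of_pos (re - rs + bs - 1) hbs
    constructor
    · nlinarith [h0, hm0, hm1]
    · nlinarith [h0, hm0, hm1]
  · rw [if_neg h]
    have : 0 ≤ PySem.Int.floordiv (rs - re) bs := by
      have := (PySem.Int.le_floordiv_iff_mul_le (a := rs - re) (q := 0) hbs).mpr (by omega)
      omega
    omega

-- per-bin, per-interval arithmetic: overlap test ⟺ bin index inside the computed index range
lemma bin_overlap_iff (bs rs re s e nbins k : Int) (hbs : 0 < bs)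
    (hk0 : 0 ≤ k) (hkn : k < nbins) :
    (s < min (rs + bs * k + bs) re ∧ rs + bs * k < e) ↔
      (s < re ∧ max 0 (PySem.Int.floordiv (s - rs) bs) ≤ k ∧
        k < min nbins (-(PySem.Int.floordiv (rs - e) bs))) := by
  have h1 : PySem.Int.floordiv (s - rs) bs ≤ k ↔ s < rs + bs * k + bs := by
    rw [Int.le_iff_lt_add_one, PySem.Int.floordiv_lt_iff_lt_mul hbs]
    constructor <;> intro hx <;> nlinarith
  have h2 : k < -(PySem.Int.floordiv (rs - e) bs) ↔ rs + bs * k < e := by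
    constructor
    · intro hx
      have h' : ¬ (-k ≤ PySem.Int.floordiv (rs - e) bs) := by omega
      rw [PySem.Int.le_floordiv_iff_mul_le hbs] at h'
      push_neg at h'
      nlinarith
    · intro hx
      by_contra hc
      have h' : -k ≤ PySem.Int.floordiv (rs - e) bs := by omega
      rw [PySem.Int.le_floordiv_iff_mul_le hbs] at h'
      nlinarith
  simp only [lt_min_iff, max_le_iff, h1, h2]
  constructor
  · rintro ⟨⟨ha, hb⟩, hc⟩; exact ⟨hb, ⟨hk0, ha⟩, hkn, hc⟩
  · rintro ⟨ha, ⟨_, hb⟩, _, hc⟩; exact ⟨⟨hb, ha⟩, hc⟩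

-- the per-chromosome step of A equals the per-chromosome contribution of B (positive bin size)
lemma chrom_eq_pos (bs rs re : Int) (hbs : 0 < bs) (pi gi : List (Int × Int))
    (acc : Int × Int × Int × Int) :
    (PySem.List.pyRange rs re bs).foldl (pv_bin_step bs re pi gi) acc =
      (let nbins := max 0 (-(PySem.Int.floordiv (rs - re) bs))
       let p := covered_bins pi rs re bs nbins
       let g := covered_bins gi rs re bs nbins
       let tp := PySem.Set.len (PySem.Set.inter p g)
       let fp := PySem.Set.len (PySem.Set.diff p g)
       let fn := PySem.Set.len (PySem.Set.diff g p)
       (acc.1 + tp, acc.2.1 + fp, acc.2.2.1 + (nbins - tp - fp - fn), acc.2.2.2 + fn)) := by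
  show _ = (acc.1 + _, acc.2.1 + _, acc.2.2.1 + _, acc.2.2.2 + _)
  set nbins := max 0 (-(PySem.Int.floordiv (rs - re) bs)) with hnbins
  set P := covered_bins pi rs re bs nbins with hPdef
  set G := covered_bins gi rs re bs nbins with hGdef
  have hnb0 : (0:Int) ≤ nbins := le_max_left _ _
  have hNlen := range_len_eq_nbins rs re bs hbs
  set N := (if rs < re then ((re - rs + bs - 1) / bs).toNat else 0) with hN
  have hNn : (N : Int) = nbins := by omega
  have hPnd : P.Nodup := nodup_covered_bins pi rs re bs nbins
  have hGnd : G.Nodup := nodup_covered_bins gi rs re bs nbins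
  have hPb : ∀ x ∈ P, 0 ≤ x ∧ x < nbins := by
    intro x hx
    rw [hPdef, mem_covered_bins] at hx
    obtain ⟨p, _, _, hx1, hx2⟩ := hx
    exact ⟨le_trans (le_max_left _ _) hx1, lt_of_lt_of_le hx2 (min_le_left _ _)⟩
  have hGb : ∀ x ∈ G, 0 ≤ x ∧ x < nbins := by
    intro x hx
    rw [hGdef, mem_covered_bins] at hx
    obtain ⟨p, _, _, hx1, hx2⟩ := hx
    exact ⟨le_trans (le_max_left _ _) hx1, lt_of_lt_of_le hx2 (min_le_left _ _)⟩
  have hcov : ∀ (ivs : List (Int × Int)) (S : PySem.Set Int),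
      S = covered_bins ivs rs re bs nbins → ∀ k : Nat, k < N →
      pv_is_bin_covered (rs + bs * k) (min (rs + bs * k + bs) re) ivs
        = decide ((k : Int) ∈ S) := by
    intro ivs S hS k hk
    have hk0 : (0:Int) ≤ (k:Int) := Int.natCast_nonneg k
    have hkn : (k:Int) < nbins := by omega
    have hiff : pv_is_bin_covered (rs + bs * k) (min (rs + bs * k + bs) re) ivs = true
        ↔ ((k:Int) ∈ S) := by
      rw [pv_is_bin_covered, List.any_eq_true, hS, mem_covered_bins]
      constructor
      · rintro ⟨p, hp, hov⟩
        simp only [pv_intervals_overlap, Bool.and_eq_true, decide_eq_true_eq] at hov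
        exact ⟨p, hp, (bin_overlap_iff bs rs re p.1 p.2 nbins k hbs hk0 hkn).mp ⟨hov.1, hov.2⟩⟩
      · rintro ⟨p, hp, hcond⟩
        refine ⟨p, hp, ?_⟩
        simp only [pv_intervals_overlap, Bool.and_eq_true, decide_eq_true_eq]
        exact (bin_overlap_iff bs rs re p.1 p.2 nbins k hbs hk0 hkn).mpr hcond
    by_cases hmem : (k:Int) ∈ S
    · simp [hmem, hiff.mpr hmem]
    · simp only [hmem, decide_false]
      exact Bool.eq_false_iff.mpr (fun hcontra => hmem (hiff.mp hcontra))
  have hcount : ∀ S : PySem.Set Int, S.Nodup → (∀ x ∈ S, 0 ≤ x ∧ x < nbins) →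
      (List.range N).countP (fun k : Nat => decide ((k:Int) ∈ S)) = S.length := by
    intro S hSnd hSb
    rw [List.countP_eq_length_filter]
    have hperm : (((List.range N).filter (fun k : Nat => decide ((k:Int) ∈ S))).map
        (fun k : Nat => (k:Int))).Perm S := by
      rw [List.perm_ext_iff_of_nodup
        (List.Nodup.map (fun a b hab => by exact_mod_cast hab)
          (List.Nodup.filter _ List.nodup_range)) hSnd]
      intro a
      simp only [List.mem_map, List.mem_filter, List.mem_range, decide_eq_true_eq]
      constructor
      · rintro ⟨k, ⟨hk, hmem⟩, rfl⟩; exact hmem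
      · intro ha
        have hb := hSb a ha
        refine ⟨a.toNat, ⟨by omega, ?_⟩, by omega⟩
        rw [Int.toNat_of_nonneg hb.1]
        exact ha
    have hlen := hperm.length_eq
    rw [List.length_map] at hlen
    exact hlen
  rw [PySem.List.pyRange_of_pos rs re hbs, List.foldl_map, ← hN]
  have hstep : List.foldl (fun acc (k : Nat) => pv_bin_step bs re pi gi acc (rs + bs * k)) acc
      (List.range N)
      = List.foldl (fun acc (k : Nat) =>
          if (decide ((k:Int) ∈ P)) && (decide ((k:Int) ∈ G)) then
            (acc.1 + 1, acc.2.1, acc.2.2.1, acc.2.2.2)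
          else if (decide ((k:Int) ∈ P)) && !(decide ((k:Int) ∈ G)) then
            (acc.1, acc.2.1 + 1, acc.2.2.1, acc.2.2.2)
          else if !(decide ((k:Int) ∈ P)) && (decide ((k:Int) ∈ G)) then
            (acc.1, acc.2.1, acc.2.2.1, acc.2.2.2 + 1)
          else (acc.1, acc.2.1, acc.2.2.1 + 1, acc.2.2.2)) acc (List.range N) := by
    apply PySem.List.foldl_congr_mem
    intro a k hk
    rw [pv_bin_step_eq_classify, hcov pi P hPdef k (List.mem_range.mp hk),
      hcov gi G hGdef k (List.mem_range.mp hk)]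
  rw [hstep, foldl_classify]
  have e1 : (fun k : Nat => decide ((k:Int) ∈ P) && decide ((k:Int) ∈ G))
      = fun k : Nat => decide ((k:Int) ∈ PySem.Set.inter P G) := by
    funext k
    by_cases h1 : (k:Int) ∈ P <;> by_cases h2 : (k:Int) ∈ G <;>
      simp [PySem.Set.mem_inter, h1, h2]
  have e2 : (fun k : Nat => decide ((k:Int) ∈ P) && !decide ((k:Int) ∈ G))
      = fun k : Nat => decide ((k:Int) ∈ PySem.Set.diff P G) := by
    funext k
    by_cases h1 : (k:Int) ∈ P <;> by_cases h2 : (k:Int) ∈ G <;>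
      simp [PySem.Set.mem_diff, h1, h2]
  have e4 : (fun k : Nat => !decide ((k:Int) ∈ P) && decide ((k:Int) ∈ G))
      = fun k : Nat => decide ((k:Int) ∈ PySem.Set.diff G P) := by
    funext k
    by_cases h1 : (k:Int) ∈ P <;> by_cases h2 : (k:Int) ∈ G <;>
      simp [PySem.Set.mem_diff, h1, h2]
  have hc1 : (List.range N).countP (fun k : Nat => decide ((k:Int) ∈ P) && decide ((k:Int) ∈ G))
      = (PySem.Set.inter P G).length := by
    rw [e1]
    exact hcount _ (PySem.Set.nodup_inter _ _ hPnd)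
      (fun x hx => hPb x ((PySem.Set.mem_inter P G x).mp hx).1)
  have hc2 : (List.range N).countP (fun k : Nat => decide ((k:Int) ∈ P) && !decide ((k:Int) ∈ G))
      = (PySem.Set.diff P G).length := by
    rw [e2]
    exact hcount _ (PySem.Set.nodup_diff _ _ hPnd)
      (fun x hx => hPb x ((PySem.Set.mem_diff P G x).mp hx).1)
  have hc4 : (List.range N).countP (fun k : Nat => !decide ((k:Int) ∈ P) && decide ((k:Int) ∈ G))
      = (PySem.Set.diff G P).length := by
    rw [e4]
    exact hcount _ (PySem.Set.nodup_diff _ _ hGnd)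
      (fun x hx => hGb x ((PySem.Set.mem_diff G P x).mp hx).1)
  have h4 := countP_four (List.range N) (fun k : Nat => decide ((k:Int) ∈ P))
    (fun k : Nat => decide ((k:Int) ∈ G))
  rw [List.length_range] at h4
  simp only [Prod.mk.injEq, PySem.Set.len]
  refine ⟨?_, ?_, ?_, ?_⟩
  · rw [hc1]
  · rw [hc2]
  · rw [hc1, hc2, hc4] at h4
    omega
  · rw [hc4]

-- list(range(a, b, s)) for a negative step, unfolded from the definition
lemma pv_pyRange_neg (a b : Int) {s : Int} (h : s < 0) :
    PySem.List.pyRange a b s = List.map (fun k => a + s * ↑k)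
      (List.range (if b < a then ((a - b + -s - 1) / -s).toNat else 0)) := by
  rw [PySem.List.pyRange]
  rw [if_neg (by omega : ¬ s = 0), if_neg (by omega : ¬ 0 < s)]

-- with a negative bin size A's bins all lie strictly above region_end, so every bin is a
-- true negative; B's index sets are empty and its nbins equals A's bin count
lemma chrom_eq_neg (bs rs re : Int) (hbs : bs < 0) (pi gi : List (Int × Int))
    (hbnd : ∀ p ∈ pi ++ gi, rs ≤ p.1 ∧ p.2 ≤ re)
    (acc : Int × Int × Int × Int) :
    (PySem.List.pyRange rs re bs).foldl (pv_bin_step bs re pi gi) acc =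
      (let nbins := max 0 (-(PySem.Int.floordiv (rs - re) bs))
       let p := covered_bins pi rs re bs nbins
       let g := covered_bins gi rs re bs nbins
       let tp := PySem.Set.len (PySem.Set.inter p g)
       let fp := PySem.Set.len (PySem.Set.diff p g)
       let fn := PySem.Set.len (PySem.Set.diff g p)
       (acc.1 + tp, acc.2.1 + fp, acc.2.2.1 + (nbins - tp - fp - fn), acc.2.2.2 + fn)) := by
  show _ = (acc.1 + _, acc.2.1 + _, acc.2.2.1 + _, acc.2.2.2 + _)
  set nbins := max 0 (-(PySem.Int.floordiv (rs - re) bs)) with hnbins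
  set P := covered_bins pi rs re bs nbins with hPdef
  set G := covered_bins gi rs re bs nbins with hGdef
  have hkey : PySem.Int.floordiv (rs - re) bs = PySem.Int.floordiv (re - rs) (-bs) := by
    have h := PySem.Int.floordiv_neg_neg (re - rs) (-bs)
    simpa using h
  have hrl := range_len_eq_nbins re rs (-bs) (by omega)
  have hnb0 : (0:Int) ≤ nbins := le_max_left _ _
  rw [pv_pyRange_neg rs re hbs]
  set N := (if re < rs then ((rs - re + -bs - 1) / -bs).toNat else 0) with hN
  have hNn : (N : Int) = nbins := by
    rw [hnbins, hkey]
    rw [hnbins, hkey] at hnb0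
    omega
  -- B's covered sets are empty
  have hsetsnil : ∀ ivs : List (Int × Int), (∀ p ∈ ivs, rs ≤ p.1 ∧ p.2 ≤ re) →
      covered_bins ivs rs re bs nbins = [] := by
    intro ivs hbd
    cases hcb : covered_bins ivs rs re bs nbins with
    | nil => rfl
    | cons y ys =>
      exfalso
      have hy : y ∈ covered_bins ivs rs re bs nbins := by
        rw [hcb]; exact List.mem_cons_self
      rw [mem_covered_bins] at hy
      obtain ⟨p, hp, hlt, h1, h2⟩ := hy
      by_cases hrr : rs ≤ re
      · have hfd : 0 ≤ PySem.Int.floordiv (re - rs) (-bs) := by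
          have := (PySem.Int.le_floordiv_iff_mul_le (a := re - rs) (q := 0)
            (by omega : (0:Int) < -bs)).mpr (by omega)
          omega
        have hnb : nbins = 0 := by rw [hnbins, hkey]; omega
        have hy1 : (0:Int) ≤ y := le_trans (le_max_left _ _) h1
        have hy2 : y < nbins := lt_of_lt_of_le h2 (min_le_left _ _)
        omega
      · exact absurd hlt (by have := (hbd p hp).1; omega)
  have hPnil : P = [] := hsetsnil pi (fun p hp => hbnd p (List.mem_append_left _ hp))
  have hGnil : G = [] := hsetsnil gi (fun p hp => hbnd p (List.mem_append_right _ hp))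
  -- every bin of A lies strictly above re, so both coverage tests are false
  have hbin : ∀ k : Nat, k < N → re < rs + bs * k := by
    intro k hk
    by_cases hrr : re < rs
    · rw [hN, if_pos hrr] at hk
      set q := (rs - re + -bs - 1) / -bs with hq
      have hqk : (k : Int) ≤ q - 1 := by omega
      have hemod := Int.ediv_add_emod (rs - re + -bs - 1) (-bs)
      have hm0 := Int.emod_nonneg (rs - re + -bs - 1) (by omega : -bs ≠ 0)
      have hm1 := Int.emod_lt_of_pos (rs - re + -bs - 1) (by omega : (0:Int) < -bs)
      have hmul : (-bs) * (k : Int) ≤ (-bs) * (q - 1) :=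
        mul_le_mul_of_nonneg_left hqk (by omega)
      nlinarith [hemod, hm0, hm1, hmul]
    · rw [hN, if_neg hrr] at hk
      omega
  have hcovfalse : ∀ (ivs : List (Int × Int)), (∀ p ∈ ivs, p.2 ≤ re) →
      ∀ k : Nat, k < N →
      pv_is_bin_covered (rs + bs * k) (min (rs + bs * k + bs) re) ivs = false := by
    intro ivs hbd k hk
    rw [pv_is_bin_covered, List.any_eq_false]
    intro p hp
    have h1 := hbd p hp
    have h2 := hbin k hk
    have hnlt : ¬ (rs + bs * k < p.2) := by omega
    simp [pv_intervals_overlap, hnlt]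
  have hstep : List.foldl (fun acc (k : Nat) => pv_bin_step bs re pi gi acc (rs + bs * k)) acc
      (List.range N)
      = List.foldl (fun acc (_ : Nat) =>
          if (false && false : Bool) then (acc.1 + 1, acc.2.1, acc.2.2.1, acc.2.2.2)
          else if (false && !false : Bool) then (acc.1, acc.2.1 + 1, acc.2.2.1, acc.2.2.2)
          else if (!false && false : Bool) then (acc.1, acc.2.1, acc.2.2.1, acc.2.2.2 + 1)
          else (acc.1, acc.2.1, acc.2.2.1 + 1, acc.2.2.2)) acc (List.range N) := by
    apply PySem.List.foldl_congr_mem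
    intro a k hk
    rw [pv_bin_step_eq_classify,
      hcovfalse pi (fun p hp => (hbnd p (List.mem_append_left _ hp)).2) k (List.mem_range.mp hk),
      hcovfalse gi (fun p hp => (hbnd p (List.mem_append_right _ hp)).2) k (List.mem_range.mp hk)]
  rw [List.foldl_map, hstep, foldl_classify (fun _ => false) (fun _ => false)]
  rw [hPnil, hGnil]
  simp only [PySem.Set.len, Prod.mk.injEq]
  refine ⟨by simp [PySem.Set.inter], by simp [PySem.Set.diff], ?_, by simp [PySem.Set.diff]⟩
  have hi : (PySem.Set.inter ([] : PySem.Set Int) ([] : PySem.Set Int)).length = 0 := by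
    simp [PySem.Set.inter]
  have hd : (PySem.Set.diff ([] : PySem.Set Int) ([] : PySem.Set Int)).length = 0 := by
    simp [PySem.Set.diff]
  have hcp : (List.range N).countP (fun _ => !false && !false) = N := by simp
  rw [hi, hd, hcp]
  omega

-- the per-chromosome step of A equals the per-chromosome contribution of B
lemma chrom_eq (bs rs re : Int) (hbs : bs ≠ 0) (pi gi : List (Int × Int))
    (hbnd : ∀ p ∈ pi ++ gi, rs ≤ p.1 ∧ p.2 ≤ re)
    (acc : Int × Int × Int × Int) :
    (PySem.List.pyRange rs re bs).foldl (pv_bin_step bs re pi gi) acc =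
      (let nbins := max 0 (-(PySem.Int.floordiv (rs - re) bs))
       let p := covered_bins pi rs re bs nbins
       let g := covered_bins gi rs re bs nbins
       let tp := PySem.Set.len (PySem.Set.inter p g)
       let fp := PySem.Set.len (PySem.Set.diff p g)
       let fn := PySem.Set.len (PySem.Set.diff g p)
       (acc.1 + tp, acc.2.1 + fp, acc.2.2.1 + (nbins - tp - fp - fn), acc.2.2.2 + fn)) := by
  rcases lt_or_gt_of_ne hbs with h | h
  · exact chrom_eq_neg bs rs re h pi gi hbnd acc
  · exact chrom_eq_pos bs rs re h pi gi acc

-- ===== VERDICT (by name: the statement is the Claim_ definition above) =====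
theorem compute_bin_level_metrics_spec : Claim_equal_compute_bin_level_metrics := by
  intro pred_dict gt_dict bin_size _ hpre
  unfold Spec_compute_bin_level_metrics
  unfold Pre_compute_bin_level_metrics at hpre
  simp only [compute_bin_level_metrics, compute_bin_level_metrics_alt]
  apply PySem.List.foldl_congr_mem
  intro acc chrom _
  by_cases h : PySem.Dict.getD (PySem.Dict.ofList pred_dict) chrom [] = [] ∧
      PySem.Dict.getD (PySem.Dict.ofList gt_dict) chrom [] = []
  · simp [h]
  · simp only [if_neg h]
    refine chrom_eq bin_size _ _ hpre _ _ ?_ acc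
    intro p hp
    constructor
    · cases hmin : PySem.List.min? (((PySem.Dict.getD (PySem.Dict.ofList pred_dict) chrom [] ++
          PySem.Dict.getD (PySem.Dict.ofList gt_dict) chrom []).map (·.1))) id with
      | none =>
        rw [PySem.List.min?_eq_none_iff] at hmin
        rw [List.map_eq_nil_iff] at hmin
        rw [hmin] at hp
        exact absurd hp (List.not_mem_nil)
      | some m =>
        have hle := PySem.List.min?_isMin hmin p.1 (List.mem_map_of_mem hp)
        simpa using hle
    · cases hmax : PySem.List.max? (((PySem.Dict.getD (PySem.Dict.ofList pred_dict) chrom [] ++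
          PySem.Dict.getD (PySem.Dict.ofList gt_dict) chrom []).map (·.2))) id with
      | none =>
        rw [PySem.List.max?_eq_none_iff] at hmax
        rw [List.map_eq_nil_iff] at hmax
        rw [hmax] at hp
        exact absurd hp (List.not_mem_nil)
      | some m =>
        have hle := PySem.List.max?_isMax hmax p.2 (List.mem_map_of_mem hp)
        simpa using hle
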